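-- pv_equiv track=rewrite | github.com/HopkinsLaboratory/DNN | support_functions.py | gen_remaining_list
-- ===== SOURCE A (Python) =====
-- def gen_remaining_list(empty_index_list,generated_index_list,actual_data_set, external_split=[]):
--     for i in range(int(round(len(actual_data_set)))):
--         if i in external_split:
--             continue
--         elif i in generated_index_list:
--             continue
--         else:
--             empty_index_list.append(i)
--
--     return empty_index_list
-- ===== SOURCE B (Python) =====
-- def gen_remaining_list(empty_index_list, generated_index_list, actual_data_set, external_split=[]):
--     keep = set(range(len(actual_data_set))) - set(external_split) - set(generated_index_list)
--     empty_index_list.extend(sorted(keep))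
--     return empty_index_list
-- ===== Notes on version B (the rewrite author's own statement) =====
-- stated objective: faster
-- what changed: Replaced the per-index loop with linear-scan membership tests by bulk set arithmetic (range minus both exclusion sets, hashed) followed by one sort, extended onto the passed-in list.
import Mathlib
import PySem

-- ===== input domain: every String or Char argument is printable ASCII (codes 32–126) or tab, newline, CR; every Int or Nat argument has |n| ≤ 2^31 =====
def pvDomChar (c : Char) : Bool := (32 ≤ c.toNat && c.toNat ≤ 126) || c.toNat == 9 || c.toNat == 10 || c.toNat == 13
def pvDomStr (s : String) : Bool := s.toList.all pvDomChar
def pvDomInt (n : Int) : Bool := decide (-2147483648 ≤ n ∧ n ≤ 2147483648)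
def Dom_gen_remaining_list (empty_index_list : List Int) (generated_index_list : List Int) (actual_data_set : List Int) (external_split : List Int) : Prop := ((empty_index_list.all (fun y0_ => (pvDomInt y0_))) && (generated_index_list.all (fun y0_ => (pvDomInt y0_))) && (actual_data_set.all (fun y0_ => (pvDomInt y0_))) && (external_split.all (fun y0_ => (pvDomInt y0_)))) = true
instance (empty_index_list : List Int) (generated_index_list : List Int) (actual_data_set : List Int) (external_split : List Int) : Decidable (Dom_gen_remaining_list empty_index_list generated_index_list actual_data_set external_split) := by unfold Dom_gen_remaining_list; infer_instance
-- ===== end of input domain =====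

-- B replaces the per-index skip-branch loop by set arithmetic (range minus both exclusion
-- sets, hash-based) plus one sort, replacing per-index linear membership scans for speed; equivalence is about the RETURN value — both
-- Pythons also mutate (append to / extend) the passed-in empty_index_list identically.

-- ===== PORT A =====
def gen_remaining_list (empty_index_list : List Int) (generated_index_list : List Int) (actual_data_set : List Int) (external_split : List Int) : List Int :=
  (PySem.List.pyRange 0 (actual_data_set.length : Int) 1).foldl
    (fun acc i =>
      if external_split.contains i then acc
      else if generated_index_list.contains i then acc
      else acc ++ [i])
    empty_index_list

-- ===== PORT B =====
def gen_remaining_list_alt (empty_index_list : List Int) (generated_index_list : List Int) (actual_data_set : List Int) (external_split : List Int) : List Int :=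
  let keep : PySem.Set Int :=
    PySem.Set.diff
      (PySem.Set.diff (PySem.Set.ofList (PySem.List.pyRange 0 (actual_data_set.length : Int) 1)) external_split)
      generated_index_list
  empty_index_list ++ PySem.List.sorted keep (fun v => v) false

-- ===== PRECONDITION & SPEC =====
def Spec_gen_remaining_list (empty_index_list : List Int) (generated_index_list : List Int) (actual_data_set : List Int) (external_split : List Int) (out : List Int) : Prop := out = gen_remaining_list_alt empty_index_list generated_index_list actual_data_set external_split
instance (empty_index_list : List Int) (generated_index_list : List Int) (actual_data_set : List Int) (external_split : List Int) (out : List Int) : Decidable (Spec_gen_remaining_list empty_index_list generated_index_list actual_data_set external_split out) := by unfold Spec_gen_remaining_list; infer_instance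

-- ===== CLAIM (what is proved, stated in full; the proofs are below) =====
def Claim_equal_gen_remaining_list : Prop := ∀ (empty_index_list : List Int) (generated_index_list : List Int) (actual_data_set : List Int) (external_split : List Int), Dom_gen_remaining_list empty_index_list generated_index_list actual_data_set external_split → Spec_gen_remaining_list empty_index_list generated_index_list actual_data_set external_split (gen_remaining_list empty_index_list generated_index_list actual_data_set external_split)

-- ===== LEMMAS AND PROOFS =====

-- A's loop is init ++ the kept indices of the range, in range order.
lemma genA_eq_filter (e g x : List Int) (n : Int) :
    (PySem.List.pyRange 0 n 1).foldl
      (fun acc i => if x.contains i then acc else if g.contains i then acc else acc ++ [i]) e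
    = e ++ (PySem.List.pyRange 0 n 1).filter (fun i => !x.contains i && !g.contains i) := by
  have hf : (fun (acc : List Int) i => if x.contains i then acc else if g.contains i then acc else acc ++ [i])
      = (fun acc i => if (!x.contains i && !g.contains i) then acc ++ [i] else acc) := by
    funext acc i
    by_cases hx : i ∈ x <;> by_cases hg : i ∈ g <;> simp [hx, hg]
  rw [hf, PySem.List.foldl_append_if]
  simp

-- B's sorted set-difference is that same filtered range.
lemma genB_sorted_eq_filter (g x : List Int) (n : Int) :
    PySem.List.sorted
      (PySem.Set.diff (PySem.Set.diff (PySem.Set.ofList (PySem.List.pyRange 0 n 1)) x) g)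
      (fun v => v) false
    = (PySem.List.pyRange 0 n 1).filter (fun i => !x.contains i && !g.contains i) := by
  set R := PySem.List.pyRange 0 n 1 with hR
  set F := R.filter (fun i => !x.contains i && !g.contains i) with hF
  set K := PySem.Set.diff (PySem.Set.diff (PySem.Set.ofList R) x) g with hK
  have hRnodup : R.Nodup := PySem.List.nodup_pyRange_one 0 n
  have hKnodup : K.Nodup := by
    apply PySem.Set.nodup_diff
    apply PySem.Set.nodup_diff
    exact PySem.Set.nodup_ofList R
  have hFnodup : F.Nodup := hRnodup.filter _
  have hmem : ∀ v : Int, v ∈ F ↔ v ∈ K := by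
    intro v
    simp [hF, hK, List.mem_filter, PySem.Set.mem_diff, PySem.Set.mem_ofList,
      List.contains_eq_mem, and_assoc, and_comm]
  have hperm : F.Perm K := (List.perm_ext_iff_of_nodup hFnodup hKnodup).mpr hmem
  have hpw : F.Pairwise (fun a b : Int => a < b) :=
    (PySem.List.pairwise_lt_pyRange_one 0 n).filter _
  exact PySem.List.sorted_eq_of_perm_of_pairwise_lt _ _ _ hperm hpw

-- ===== VERDICT (by name: the statement is the Claim_ definition above) =====
theorem gen_remaining_list_spec : Claim_equal_gen_remaining_list := by
  intro e g a x _
  show _ = _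
  rw [gen_remaining_list, gen_remaining_list_alt, genA_eq_filter, genB_sorted_eq_filter]
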